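-- pv_equiv track=rewrite | github.com/MAN3RAF/Python | Python-07/ex3/AggressiveStrategy.py | prioritize_targets
-- ===== SOURCE A (Python) =====
-- def prioritize_targets(available_targets: list) -> list:
--     """Prioritize targets with player first."""
--     targets = []
--
--     for target in available_targets:
--         if target == 'player':
--             targets.insert(0, target)
--         else:
--             targets.append(target)
--     return targets
-- ===== SOURCE B (Python) =====
-- def prioritize_targets(available_targets: list) -> list:
--     """Prioritize targets with player first."""
--     n = available_targets.count('player')
--     return ['player'] * n + [t for t in available_targets if t != 'player']
-- ===== Notes on version B (the rewrite author's own statement) =====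
-- stated objective: simpler
-- what changed: Replaces the per-element insert-at-front/append loop with a single count plus filter, concatenating the player block with the non-players kept in order.
import Mathlib
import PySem

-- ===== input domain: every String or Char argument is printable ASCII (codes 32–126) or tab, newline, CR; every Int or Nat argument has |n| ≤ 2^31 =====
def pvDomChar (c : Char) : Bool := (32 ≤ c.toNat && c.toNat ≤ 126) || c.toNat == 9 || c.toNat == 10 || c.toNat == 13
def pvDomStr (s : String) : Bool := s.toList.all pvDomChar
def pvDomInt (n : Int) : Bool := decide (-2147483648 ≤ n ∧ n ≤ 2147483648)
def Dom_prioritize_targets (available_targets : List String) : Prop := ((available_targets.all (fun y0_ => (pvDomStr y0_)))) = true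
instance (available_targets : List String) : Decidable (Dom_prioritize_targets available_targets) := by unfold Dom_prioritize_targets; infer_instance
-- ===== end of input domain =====

-- B replaces A's insert-at-front/append loop with a single count + filter concatenation (simpler, one pass per primitive).


-- ===== PORT A =====
-- loop: targets.insert(0, target) = target :: targets; targets.append(target) = targets ++ [target]
def prioritize_targets (available_targets : List String) : List String :=
  available_targets.foldl
    (fun targets target => if target = "player" then target :: targets else targets ++ [target]) []

-- ===== PORT B =====
def prioritize_targets_alt (available_targets : List String) : List String :=
  let n := PySem.List.count available_targets "player"
  List.replicate n "player" ++ available_targets.filter (fun t => t ≠ "player")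

-- ===== PRECONDITION & SPEC =====
def Spec_prioritize_targets (available_targets : List String) (out : List String) : Prop := out = prioritize_targets_alt available_targets
instance (available_targets : List String) (out : List String) : Decidable (Spec_prioritize_targets available_targets out) := by unfold Spec_prioritize_targets; infer_instance

-- ===== CLAIM (what is proved, stated in full; the proofs are below) =====
def Claim_equal_prioritize_targets : Prop := ∀ (available_targets : List String), Dom_prioritize_targets available_targets → Spec_prioritize_targets available_targets (prioritize_targets available_targets)

-- ===== LEMMAS AND PROOFS =====

-- loop invariant: starting from a state "k players then rest r", the fold adds the
-- players of l to the block and the non-players of l behind r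
theorem pv_fold_invariant (l : List String) (k : Nat) (r : List String) :
    l.foldl (fun targets target => if target = "player" then target :: targets else targets ++ [target])
      (List.replicate k "player" ++ r)
    = List.replicate (k + l.count "player") "player" ++ (r ++ l.filter (fun t => t ≠ "player")) := by
  induction l generalizing k r with
  | nil => simp
  | cons t l ih =>
    by_cases h : t = "player"
    · subst h
      have : ("player" :: (List.replicate k "player" ++ r)) = List.replicate (k+1) "player" ++ r := by
        simp [List.replicate_succ]
      simp only [List.foldl_cons, reduceIte, this]
      rw [ih]
      have hk : (k + 1) + l.count "player" = k + ("player" :: l).count "player" := by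
        simp [List.count_cons]; omega
      simp [hk, List.filter_cons]
    · have : ((List.replicate k "player" ++ r) ++ [t]) = List.replicate k "player" ++ (r ++ [t]) := by
        simp
      simp only [List.foldl_cons, if_neg h, this]
      rw [ih]
      simp [List.count_cons, h, List.filter_cons]

-- ===== VERDICT (by name: the statement is the Claim_ definition above) =====
theorem prioritize_targets_spec : Claim_equal_prioritize_targets := by
  intro l _
  unfold Spec_prioritize_targets prioritize_targets prioritize_targets_alt
  have h := pv_fold_invariant l 0 []
  simpa [PySem.List.count] using h
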